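-- pv_equiv track=rewrite | github.com/MagnusDH/INF-3200-Distributed-Systems-Fundamentals | Assignments/A2/src/initialize_ring.py | find_successor
-- ===== SOURCE A (Python) =====
-- def find_successor(node_ID, list_all_IDs):
--     successor_ID = None
--     list_all_IDs.sort()
--
--     for ID in list_all_IDs:
--         if(node_ID < ID):
--             successor_ID = ID
--             break
--
--     if(successor_ID == None):
--         successor_ID = list_all_IDs[0]
--
--
--     return successor_ID
-- ===== SOURCE B (Python) =====
-- def find_successor(node_ID, list_all_IDs):
--     list_all_IDs.sort()
--     lo, hi = 0, len(list_all_IDs)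
--     while lo < hi:
--         mid = (lo + hi) // 2
--         if list_all_IDs[mid] <= node_ID:
--             lo = mid + 1
--         else:
--             hi = mid
--     if lo < len(list_all_IDs):
--         return list_all_IDs[lo]
--     return list_all_IDs[0]
-- ===== Notes on version B (the rewrite author's own statement) =====
-- stated objective: alternative
-- what changed: Replaces A's linear scan over the sorted list with a hand-written bisect_right binary search; both keep the in-place sort (the argument mutation and the empty-list IndexError are unchanged).
import Mathlib
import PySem

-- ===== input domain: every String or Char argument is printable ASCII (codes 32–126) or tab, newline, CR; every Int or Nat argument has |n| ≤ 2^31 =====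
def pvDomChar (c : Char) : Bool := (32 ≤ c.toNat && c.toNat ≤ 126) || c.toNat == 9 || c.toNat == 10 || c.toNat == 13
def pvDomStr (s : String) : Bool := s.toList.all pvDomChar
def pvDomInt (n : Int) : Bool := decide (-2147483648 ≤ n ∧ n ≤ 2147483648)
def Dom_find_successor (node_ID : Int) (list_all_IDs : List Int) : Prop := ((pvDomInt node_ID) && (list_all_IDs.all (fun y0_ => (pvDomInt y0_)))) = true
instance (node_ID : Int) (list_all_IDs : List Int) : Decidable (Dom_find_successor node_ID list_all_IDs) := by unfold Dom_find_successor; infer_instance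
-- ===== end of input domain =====

-- B replaces A's linear scan of the sorted list with a bisect_right binary search (alternative
-- algorithm, same cost class); both A and B sort the argument IN PLACE — the equivalence proved
-- here is about the return value only (and the mutation is identical anyway).

-- ===== PORT A =====
-- the for-loop with break: first ID in the sorted list with node_ID < ID
def pvScanA (x : Int) : List Int → Option Int
  | [] => none
  | id :: rest => if x < id then some id else pvScanA x rest

def find_successor (node_ID : Int) (list_all_IDs : List Int) : Int :=
  let s := PySem.List.sorted list_all_IDs (fun a => a) false
  match pvScanA node_ID s with
  | some i => i
  | none => (PySem.List.pyGet? s 0).getD 0  -- list_all_IDs[0]; none (IndexError) only outside Pre_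

-- ===== PORT B =====
-- the hand-written while-loop binary search of Source B (bisect_right)
def pvBisect (s : List Int) (x : Int) (lo hi : Nat) : Nat :=
  if lo < hi then
    let mid := (lo + hi) / 2
    if s.getD mid 0 ≤ x then pvBisect s x (mid + 1) hi else pvBisect s x lo mid
  else lo
termination_by hi - lo
decreasing_by all_goals omega

def find_successor_alt (node_ID : Int) (list_all_IDs : List Int) : Int :=
  let s := PySem.List.sorted list_all_IDs (fun a => a) false
  let lo := pvBisect s node_ID 0 s.length
  if lo < s.length then s.getD lo 0
  else (PySem.List.pyGet? s 0).getD 0  -- list_all_IDs[0]; none (IndexError) only outside Pre_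

-- ===== PRECONDITION & SPEC =====
-- On the empty list Python A raises IndexError at list_all_IDs[0] (and B does too); excluded.
def Pre_find_successor (node_ID : Int) (list_all_IDs : List Int) : Prop := list_all_IDs ≠ []
instance (node_ID : Int) (list_all_IDs : List Int) : Decidable (Pre_find_successor node_ID list_all_IDs) := by unfold Pre_find_successor; infer_instance
def pvWitness_find_successor : Int × List Int := (3, [1, 4, 2])

def Spec_find_successor (node_ID : Int) (list_all_IDs : List Int) (out : Int) : Prop := out = find_successor_alt node_ID list_all_IDs
instance (node_ID : Int) (list_all_IDs : List Int) (out : Int) : Decidable (Spec_find_successor node_ID list_all_IDs out) := by unfold Spec_find_successor; infer_instance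

-- ===== CLAIM (what is proved, stated in full; the proofs are below) =====
def Claim_equal_find_successor : Prop := ∀ (node_ID : Int) (list_all_IDs : List Int), Dom_find_successor node_ID list_all_IDs → Pre_find_successor node_ID list_all_IDs → Spec_find_successor node_ID list_all_IDs (find_successor node_ID list_all_IDs)

-- ===== LEMMAS AND PROOFS =====

-- monotone access into a sorted list
theorem pv_sorted_getD_mono {s : List Int} (hs : s.Pairwise (· ≤ ·))
    {i j : Nat} (hij : i ≤ j) (hj : j < s.length) : s.getD i 0 ≤ s.getD j 0 := by
  rcases Nat.lt_or_ge i j with h | h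
  · have := (List.pairwise_iff_getElem.mp hs) i j (lt_of_lt_of_le h (le_of_lt hj)) hj h
    simpa [List.getD_eq_getElem?_getD, List.getElem?_eq_getElem,
      lt_of_lt_of_le h (le_of_lt hj), hj] using this
  · have : i = j := le_antisymm hij h
    simp [this]

-- the binary-search invariant: everything strictly below the result is ≤ x,
-- everything at or above it (within the list) is > x
theorem pvBisect_inv (s : List Int) (x : Int) (hs : s.Pairwise (· ≤ ·)) :
    ∀ (n lo hi : Nat), hi - lo ≤ n → lo ≤ hi → hi ≤ s.length →
    (∀ i, i < lo → s.getD i 0 ≤ x) →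
    (∀ i, hi ≤ i → i < s.length → x < s.getD i 0) →
    (pvBisect s x lo hi ≤ s.length ∧
     (∀ i, i < pvBisect s x lo hi → s.getD i 0 ≤ x) ∧
     (∀ i, pvBisect s x lo hi ≤ i → i < s.length → x < s.getD i 0)) := by
  intro n
  induction n with
  | zero =>
    intro lo hi hn hlohi hhi hlow hhigh
    have h : ¬ lo < hi := by omega
    rw [pvBisect]
    simp only [h, if_false]
    exact ⟨by omega, hlow, fun i h1 h2 => hhigh i (by omega) h2⟩
  | succ k ih =>
    intro lo hi hn hlohi hhi hlow hhigh
    rw [pvBisect]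
    by_cases h : lo < hi
    · have hmid : lo ≤ (lo + hi) / 2 ∧ (lo + hi) / 2 < hi := by omega
      simp only [h, if_true]
      by_cases hm : s.getD ((lo + hi) / 2) 0 ≤ x
      · simp only [hm, if_true]
        refine ih ((lo + hi) / 2 + 1) hi (by omega) (by omega) hhi ?_ hhigh
        intro i hi'
        exact le_trans (pv_sorted_getD_mono hs (by omega) (by omega)) hm
      · simp only [hm, if_false]
        refine ih lo ((lo + hi) / 2) (by omega) (by omega) (by omega) hlow ?_
        intro i hi1 hi2
        exact lt_of_not_ge fun hc => hm (le_trans (pv_sorted_getD_mono hs hi1 hi2) hc)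
    · simp only [h, if_false]
      exact ⟨by omega, hlow, fun i h1 h2 => hhigh i (by omega) h2⟩

-- A's scan skips a prefix whose elements all fail the test
theorem pvScanA_drop (x : Int) :
    ∀ (s : List Int) (n : Nat), (∀ i, i < n → i < s.length → s.getD i 0 ≤ x) →
    pvScanA x s = pvScanA x (s.drop n) := by
  intro s
  induction s with
  | nil => intro n _; simp
  | cons a t iht =>
    intro n hp
    cases n with
    | zero => simp
    | succ m =>
      have ha : a ≤ x := by simpa using hp 0 (by omega) (by simp)
      have : ¬ x < a := not_lt.mpr ha
      simp only [pvScanA, this, if_false, List.drop_succ_cons]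
      exact iht m fun i h1 h2 => by simpa using hp (i + 1) (by omega) (by simpa using h2)

-- A's scan result coincides with indexing at the bisection point, on any sorted list
theorem pv_key (x : Int) (s : List Int) (hs : s.Pairwise (· ≤ ·)) :
    (match pvScanA x s with
     | some i => i
     | none => (PySem.List.pyGet? s 0).getD 0) =
    (if pvBisect s x 0 s.length < s.length then s.getD (pvBisect s x 0 s.length) 0
     else (PySem.List.pyGet? s 0).getD 0) := by
  obtain ⟨hle, hlow, hhigh⟩ :=
    pvBisect_inv s x hs s.length 0 s.length (by omega) (Nat.zero_le _) (le_refl _)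
      (fun i hi => absurd hi (Nat.not_lt_zero i)) (fun i h1 h2 => absurd h2 (by omega))
  generalize hrdef : pvBisect s x 0 s.length = r at *
  have hscan : pvScanA x s = pvScanA x (s.drop r) :=
    pvScanA_drop x s r fun i h1 _ => hlow i h1
  by_cases hr : r < s.length
  · have hxd : s.drop r = s[r] :: s.drop (r + 1) := List.drop_eq_getElem_cons hr
    have hxr : x < s[r] := by
      have := hhigh r (le_refl _) hr
      simpa [List.getD_eq_getElem?_getD, List.getElem?_eq_getElem, hr] using this
    rw [hscan, hxd]
    simp only [pvScanA, if_pos hxr, if_pos hr]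
    simp [List.getD_eq_getElem?_getD, hr]
  · have hr' : r = s.length := by omega
    have hnil : s.drop r = [] := by simp [hr']
    rw [hscan, hnil]
    simp only [pvScanA, if_neg hr]

-- ===== VERDICT (by name: the statement is the Claim_ definition above) =====
theorem find_successor_spec : Claim_equal_find_successor := by
  intro x l _ _
  unfold Spec_find_successor find_successor find_successor_alt
  have hs : (PySem.List.sorted l (fun a => a) false).Pairwise (· ≤ ·) := by
    simpa using PySem.List.sorted_pairwise (xs := l) (key := fun a => a)
  exact pv_key x _ hs
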